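-- pv_equiv track=rewrite | github.com/nermadie/CodeForces_Solutions | Utils/BinarySearch.py | bs_asc_last_more
-- ===== SOURCE A (Python) =====
-- def _init_lr(arr, l, r):
--     if l is None:
--         l = 0
--     if r is None:
--         r = len(arr) - 1
--     return l, r
--
-- def bs_asc_last_more(arr, x, l=None, r=None):
--     l, r = _init_lr(arr, l, r)
--     res = -1
--     while l <= r:
--         m = (l + r) // 2
--         if arr[m] > x:
--             res = m
--             l = m + 1  # ép sang phải để lấy LAST
--         else:
--             l = m + 1
--     return res
-- ===== SOURCE B (Python) =====
-- def bs_asc_last_more(arr, x, l=None, r=None):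
--     if l is None:
--         l = 0
--     if r is None:
--         r = len(arr) - 1
--     if l > r:
--         return -1
--     return r if arr[r] > x else -1
-- ===== Notes on version B (the rewrite author's own statement) =====
-- stated objective: simpler
-- what changed: On an ascending segment A's loop can only ever keep its final midpoint r, so B replaces the whole loop by a single check of arr[r]; Pre_ excludes inputs whose inspected segment arr[l..r] is not ascending (A's value there is an accident of which midpoints the loop visits) and, when the loop runs, negative effective l (Python wraparound indexing or IndexError) and out-of-range r (IndexError).
-- outside the precondition, e.g. on bs_asc_last_more([5, 1], 3, None, None): A returns 0, B returns -1; on bs_asc_last_more([0, 0, 9, 9], 5, -5, 1): A returns -2, B returns -1; on bs_asc_last_more([1, 2, 3], 2, -30, 2): A raises IndexError, B returns 2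
import Mathlib
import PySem

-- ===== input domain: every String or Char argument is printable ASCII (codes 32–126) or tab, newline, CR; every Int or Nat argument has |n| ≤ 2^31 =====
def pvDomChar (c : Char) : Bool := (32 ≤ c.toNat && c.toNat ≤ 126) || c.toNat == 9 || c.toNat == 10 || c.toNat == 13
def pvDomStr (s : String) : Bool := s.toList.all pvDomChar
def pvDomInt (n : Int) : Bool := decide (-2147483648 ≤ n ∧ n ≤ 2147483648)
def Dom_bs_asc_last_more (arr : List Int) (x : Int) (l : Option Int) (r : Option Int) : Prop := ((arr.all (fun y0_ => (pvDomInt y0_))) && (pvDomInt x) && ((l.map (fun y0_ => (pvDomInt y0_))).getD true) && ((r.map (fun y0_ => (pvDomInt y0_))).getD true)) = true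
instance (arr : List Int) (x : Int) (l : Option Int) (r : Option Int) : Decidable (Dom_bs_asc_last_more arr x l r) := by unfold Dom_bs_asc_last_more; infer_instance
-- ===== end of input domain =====

-- B replaces A's midpoint loop (which on an ascending segment can only ever keep its
-- final midpoint r) by a single check of arr[r].

-- ===== PORT A =====
-- the while-loop of A; both branches set l := m + 1, so the measure r + 1 - l decreases.
-- arr[m] is pyGetD arr m 0: Python raises IndexError where pyGet? is none; Pre_ keeps
-- every visited index in range, so the default 0 is never the value used.
def bsLoop (arr : List Int) (x : Int) (res l r : Int) : Int :=
  if hlr : l ≤ r then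
    let m := PySem.Int.floordiv (l + r) 2
    if PySem.List.pyGetD arr m 0 > x then
      bsLoop arr x m (m + 1) r
    else
      bsLoop arr x res (m + 1) r
  else res
termination_by (r + 1 - l).toNat
decreasing_by
  all_goals
    have hm := PySem.Int.floordiv_two_mid_bounds hlr
    omega

def bs_asc_last_more (arr : List Int) (x : Int) (l : Option Int) (r : Option Int) : Int :=
  -- _init_lr
  let l0 : Int := match l with | none => 0 | some v => v
  let r0 : Int := match r with | none => (arr.length : Int) - 1 | some v => v
  bsLoop arr x (-1) l0 r0

-- ===== PORT B =====
def bs_asc_last_more_alt (arr : List Int) (x : Int) (l : Option Int) (r : Option Int) : Int :=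
  let l0 : Int := match l with | none => 0 | some v => v
  let r0 : Int := match r with | none => (arr.length : Int) - 1 | some v => v
  if l0 > r0 then -1
  else if PySem.List.pyGetD arr r0 0 > x then r0 else -1

-- ===== PRECONDITION & SPEC =====
-- Pre_ excludes: inputs whose inspected segment arr[l0..r0] is not ascending (A's value
-- there is an accident of which midpoints its loop happens to visit), and — when the loop
-- runs (l0 ≤ r0) — a negative effective l (Python wraparound indexing or IndexError) or
-- r ≥ len(arr) (IndexError).
def Pre_bs_asc_last_more (arr : List Int) (x : Int) (l : Option Int) (r : Option Int) : Prop :=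
  (match r with | none => (arr.length : Int) - 1 | some v => v) <
    (match l with | none => 0 | some v => v) ∨
  (0 ≤ (match l with | none => 0 | some v => v) ∧
   (match r with | none => (arr.length : Int) - 1 | some v => v) < (arr.length : Int) ∧
   List.Pairwise (· ≤ ·)
     ((arr.drop (match l with | none => 0 | some v => v).toNat).take
       ((match r with | none => (arr.length : Int) - 1 | some v => v) -
        (match l with | none => 0 | some v => v) + 1).toNat))
instance (arr : List Int) (x : Int) (l : Option Int) (r : Option Int) : Decidable (Pre_bs_asc_last_more arr x l r) := by unfold Pre_bs_asc_last_more; infer_instance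

def pvWitness_bs_asc_last_more : List Int × Int × Option Int × Option Int :=
  ([1, 2, 2, 5], 2, none, none)

def Spec_bs_asc_last_more (arr : List Int) (x : Int) (l : Option Int) (r : Option Int) (out : Int) : Prop := out = bs_asc_last_more_alt arr x l r
instance (arr : List Int) (x : Int) (l : Option Int) (r : Option Int) (out : Int) : Decidable (Spec_bs_asc_last_more arr x l r out) := by unfold Spec_bs_asc_last_more; infer_instance

-- ===== CLAIM (what is proved, stated in full; the proofs are below) =====
def Claim_equal_bs_asc_last_more : Prop := ∀ (arr : List Int) (x : Int) (l : Option Int) (r : Option Int), Dom_bs_asc_last_more arr x l r → Pre_bs_asc_last_more arr x l r → Spec_bs_asc_last_more arr x l r (bs_asc_last_more arr x l r)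

-- ===== LEMMAS AND PROOFS =====

-- the only order fact the loop needs: every index it can still visit is ≤-below arr[r]
lemma bsLoop_eq (arr : List Int) (x : Int) (lo r : Int)
    (H : ∀ m : Int, lo ≤ m → m ≤ r →
      PySem.List.pyGetD arr m 0 ≤ PySem.List.pyGetD arr r 0) :
    ∀ (n : Nat) (l res : Int), (r - l).toNat ≤ n → lo ≤ l → l ≤ r →
      bsLoop arr x res l r =
        if PySem.List.pyGetD arr r 0 > x then r else res := by
  intro n
  induction n with
  | zero =>
    intro l res hn hlo hlr
    have hlr' : l = r := by omega
    subst hlr'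
    have hm : PySem.Int.floordiv (l + l) 2 = l := by
      have := PySem.Int.floordiv_two_mid_bounds (le_refl l)
      omega
    rw [bsLoop]
    simp only [dif_pos (le_refl l), hm]
    split
    · rw [bsLoop]; simp only [dif_neg (by omega : ¬ l + 1 ≤ l)]
    · rw [bsLoop]; simp only [dif_neg (by omega : ¬ l + 1 ≤ l)]
  | succ n ih =>
    intro l res hn hlo hlr
    have hm := PySem.Int.floordiv_two_mid_bounds hlr
    set m := PySem.Int.floordiv (l + r) 2 with hmdef
    rw [bsLoop]
    simp only [dif_pos hlr, ← hmdef]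
    by_cases hmr : m = r
    · -- last iteration: m = r, so the next l is r + 1 and the loop stops
      rw [hmr]
      split
      · rw [bsLoop]; simp only [dif_neg (by omega : ¬ r + 1 ≤ r)]
      · rw [bsLoop]; simp only [dif_neg (by omega : ¬ r + 1 ≤ r)]
    · have hmlt : m < r := lt_of_le_of_ne hm.2 hmr
      have hrec : ∀ res', bsLoop arr x res' (m + 1) r =
          if PySem.List.pyGetD arr r 0 > x then r else res' := fun res' =>
        ih (m + 1) res' (by omega) (by omega) (by omega)
      split
      · rename_i hgt
        rw [hrec m]
        have hle : PySem.List.pyGetD arr m 0 ≤ PySem.List.pyGetD arr r 0 :=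
          H m (by omega) (by omega)
        have hr' : PySem.List.pyGetD arr r 0 > x := by omega
        simp [hr']
      · exact hrec res

-- an ascending slice arr[l0..r0] gives the order fact bsLoop_eq needs
lemma sorted_slice_getD_le (arr : List Int) (l0 r0 : Int)
    (h0 : 0 ≤ l0) (hlen : r0 < (arr.length : Int))
    (hs : List.Pairwise (· ≤ ·) ((arr.drop l0.toNat).take (r0 - l0 + 1).toNat))
    (m : Int) (hml : l0 ≤ m) (hmr : m ≤ r0) :
    PySem.List.pyGetD arr m 0 ≤ PySem.List.pyGetD arr r0 0 := by
  rw [PySem.List.pyGetD_eq_getElem arr 0 (by omega) (by omega),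
      PySem.List.pyGetD_eq_getElem arr 0 (by omega) (by omega)]
  rcases eq_or_lt_of_le hmr with heq | hlt
  · simp [heq]
  · have hsl : ∀ (k : Nat) (hk : k < ((arr.drop l0.toNat).take (r0 - l0 + 1).toNat).length),
        ((arr.drop l0.toNat).take (r0 - l0 + 1).toNat)[k] = arr[l0.toNat + k]'(by
          simp at hk; omega) := by
      intro k hk
      simp only [List.getElem_take, List.getElem_drop]
    have hklen : ((arr.drop l0.toNat).take (r0 - l0 + 1).toNat).length
        = (r0 - l0 + 1).toNat := by
      simp; omega
    have := (List.pairwise_iff_getElem.mp hs) (m.toNat - l0.toNat) (r0.toNat - l0.toNat)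
      (by omega) (by omega) (by omega)
    rw [hsl _ (by omega), hsl _ (by omega)] at this
    have hm' : l0.toNat + (m.toNat - l0.toNat) = m.toNat := by omega
    have hr' : l0.toNat + (r0.toNat - l0.toNat) = r0.toNat := by omega
    simpa [hm', hr'] using this

-- A at concrete bounds l0, r0 equals B's one-shot check
lemma bs_main_aux (arr : List Int) (x : Int) (l0 r0 : Int)
    (hcase : r0 < l0 ∨ (0 ≤ l0 ∧ r0 < (arr.length : Int) ∧
      List.Pairwise (· ≤ ·) ((arr.drop l0.toNat).take (r0 - l0 + 1).toNat))) :
    bsLoop arr x (-1) l0 r0 =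
      if l0 > r0 then -1 else if PySem.List.pyGetD arr r0 0 > x then r0 else -1 := by
  by_cases hlr : l0 ≤ r0
  · rcases hcase with hlt | ⟨h0, hlen, hs⟩
    · omega
    · rw [bsLoop_eq arr x l0 r0 (sorted_slice_getD_le arr l0 r0 h0 hlen hs)
          (r0 - l0).toNat l0 (-1) (le_refl _) (le_refl _) hlr]
      simp [show ¬ l0 > r0 by omega]
  · rw [bsLoop]
    simp only [dif_neg hlr]
    simp [show l0 > r0 by omega]

-- ===== VERDICT (by name: the statement is the Claim_ definition above) =====
theorem bs_asc_last_more_spec : Claim_equal_bs_asc_last_more := by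
  intro arr x l r _ hpre
  unfold Spec_bs_asc_last_more bs_asc_last_more bs_asc_last_more_alt
  cases l <;> cases r <;> exact bs_main_aux arr x _ _ hpre
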